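-- pv_equiv track=rewrite | github.com/yago-mendoza/Pythology | Leet/Greedy.py | solution
-- ===== SOURCE A (Python) =====
-- def solution(X, Y, colors):
--     pts = [(x**2 + y**2, color) for x, y, color in zip(X, Y, colors)]
--     pts.sort(key = lambda x : x[0])
--     count = idx = 0
--     for i, (_,c) in enumerate(pts):
--         count += 1 if c == 'G' else -1
--         if count == 0:
--             idx = i
--     return idx+1 if idx else idx
-- ===== SOURCE B (Python) =====
-- def solution(X, Y, colors):
--     cs = [c for _, c in sorted(((x * x + y * y, c) for x, y, c in zip(X, Y, colors)),
--                                key=lambda p: p[0])]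
--     # balance-zero prefixes are found from the END: prefix balance at i is zero
--     # exactly when the suffix sum after i equals the total balance, so one
--     # backward early-exit scan against the precomputed total suffices.
--     total = 2 * cs.count('G') - len(cs)
--     suffix = 0
--     for i in range(len(cs) - 1, -1, -1):
--         if suffix == total:
--             return i + 1 if i else 0
--         suffix += 1 if cs[i] == 'G' else -1
--     return 0
-- ===== Notes on version B (the rewrite author's own statement) =====
-- stated objective: alternative
-- what changed: Replaces A's forward running-balance scan that overwrites the last zero index with an order-independent total balance computed from a color count plus a backward early-exit suffix-sum scan: prefix balance at i is zero iff the suffix sum after i equals the total, so the first hit from the end is the answer.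
import Mathlib
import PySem

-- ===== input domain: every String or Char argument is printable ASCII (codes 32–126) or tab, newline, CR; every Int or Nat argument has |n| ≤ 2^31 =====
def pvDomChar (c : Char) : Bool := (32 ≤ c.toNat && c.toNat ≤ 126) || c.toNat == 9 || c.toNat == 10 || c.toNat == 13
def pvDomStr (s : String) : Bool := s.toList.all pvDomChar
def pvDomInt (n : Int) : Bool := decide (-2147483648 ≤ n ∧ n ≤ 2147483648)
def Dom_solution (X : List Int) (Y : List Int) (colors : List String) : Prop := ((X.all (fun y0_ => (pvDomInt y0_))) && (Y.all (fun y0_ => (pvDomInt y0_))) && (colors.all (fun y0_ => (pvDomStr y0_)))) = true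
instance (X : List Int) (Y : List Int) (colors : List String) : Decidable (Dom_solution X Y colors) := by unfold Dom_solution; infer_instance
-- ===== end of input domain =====

-- B replaces A's forward running-balance scan by a count-based total balance plus a
-- backward early-exit suffix-sum scan (objective: alternative, same cost).

-- ===== PORT A =====
-- pts = [(x**2 + y**2, color) for x, y, color in zip(X, Y, colors)]; pts.sort(key=...)
def pvPtsA (X : List Int) (Y : List Int) (colors : List String) : List (Int × String) :=
  PySem.List.sorted ((X.zip (Y.zip colors)).map (fun t => (t.1 * t.1 + t.2.1 * t.2.1, t.2.2)))
    (fun p => p.1) false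

-- the for-loop: state (count, idx), idx kept as Int like Python's
def pvLoopA (pts : List (Int × String)) : Int × Int :=
  (PySem.List.enumerate pts).foldl
    (fun s ip =>
      let count := s.1 + (if ip.2.2 == "G" then 1 else -1)
      (count, if count = 0 then ip.1 else s.2))
    (0, 0)

def solution (X : List Int) (Y : List Int) (colors : List String) : Int :=
  let pts := pvPtsA X Y colors
  let st := pvLoopA pts
  if st.2 ≠ 0 then st.2 + 1 else st.2

-- ===== PORT B =====
-- cs = [c for _, c in sorted(... same comprehension ..., key=lambda p: p[0])]
def pvCsB (X : List Int) (Y : List Int) (colors : List String) : List String :=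
  (PySem.List.sorted ((X.zip (Y.zip colors)).map (fun t => (t.1 * t.1 + t.2.1 * t.2.1, t.2.2)))
    (fun p => p.1) false).map (fun p => p.2)

-- the backward index loop 'for i in range(len(cs)-1, -1, -1)' rendered as structural
-- recursion over cs.reverse carrying the index i; exact since cs[i] is always in range
def pvDownB : List String → Int → Int → Int → Int
  | [], _, _, _ => 0
  | c :: rest, i, suffix, total =>
      if suffix = total then (if i ≠ 0 then i + 1 else 0)
      else pvDownB rest (i - 1) (suffix + (if c == "G" then 1 else -1)) total

def solution_alt (X : List Int) (Y : List Int) (colors : List String) : Int :=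
  let cs := pvCsB X Y colors
  let total := 2 * (PySem.List.count cs "G" : Int) - (cs.length : Int)
  pvDownB cs.reverse ((cs.length : Int) - 1) 0 total

-- ===== PRECONDITION & SPEC =====
def Spec_solution (X : List Int) (Y : List Int) (colors : List String) (out : Int) : Prop := out = solution_alt X Y colors
instance (X : List Int) (Y : List Int) (colors : List String) (out : Int) : Decidable (Spec_solution X Y colors out) := by unfold Spec_solution; infer_instance

-- ===== CLAIM =====
def Claim_equal_solution : Prop := ∀ (X : List Int) (Y : List Int) (colors : List String), Dom_solution X Y colors → Spec_solution X Y colors (solution X Y colors)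

-- ===== LEMMAS AND PROOFS =====

-- the running balance of a color list
def pvBal (cs : List String) : Int :=
  cs.foldl (fun s c => s + (if c == "G" then 1 else -1)) 0

theorem pvBal_append (cs : List String) (c : String) :
    pvBal (cs ++ [c]) = pvBal cs + (if c == "G" then 1 else -1) := by
  simp [pvBal, List.foldl_append]

theorem pvCount_bal (cs : List String) :
    2 * (PySem.List.count cs "G" : Int) - (cs.length : Int) = pvBal cs := by
  induction cs using List.reverseRecOn with
  | nil => rfl
  | append_singleton l c ih =>
      rw [pvBal_append, ← ih]
      simp [PySem.List.count, List.count_append]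
      by_cases h : c = "G" <;> simp [h] <;> ring

theorem pvLoopA_append (pts : List (Int × String)) (p : Int × String) :
    pvLoopA (pts ++ [p]) =
      ((pvLoopA pts).1 + (if p.2 == "G" then 1 else -1),
       if (pvLoopA pts).1 + (if p.2 == "G" then 1 else -1) = 0 then (pts.length : Int)
       else (pvLoopA pts).2) := by
  simp [pvLoopA, PySem.List.enumerate_append, List.foldl_append]

theorem pvLoopA_fst (pts : List (Int × String)) :
    (pvLoopA pts).1 = pvBal (pts.map (fun p => p.2)) := by
  induction pts using List.reverseRecOn with
  | nil => rfl
  | append_singleton l p ih => simp [pvLoopA_append, pvBal_append, ih]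

theorem pvDownB_shift (l : List String) (i s t d : Int) :
    pvDownB l i (s + d) (t + d) = pvDownB l i s t := by
  induction l generalizing i s t with
  | nil => rfl
  | cons c rest ih =>
      simp only [pvDownB]
      by_cases h : s = t
      · simp [h]
      · have h' : ¬ (s + d = t + d) := by omega
        rw [if_neg h', if_neg h]
        have := ih (i - 1) (s + (if c == "G" then 1 else -1)) t
        simpa [add_right_comm] using this

theorem pvCore (pts : List (Int × String)) :
    (if (pvLoopA pts).2 ≠ 0 then (pvLoopA pts).2 + 1 else (pvLoopA pts).2) =
      pvDownB (pts.map (fun p => p.2)).reverse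
        (((pts.map (fun p => p.2)).length : Int) - 1) 0 (pvBal (pts.map (fun p => p.2))) := by
  induction pts using List.reverseRecOn with
  | nil => rfl
  | append_singleton l p ih =>
      have hmap : (l ++ [p]).map (fun q => q.2) = l.map (fun q => q.2) ++ [p.2] := by simp
      rw [pvLoopA_append, hmap, pvBal_append, List.reverse_append]
      simp only [List.reverse_singleton, List.singleton_append, pvDownB,
        List.length_append, List.length_map, List.length_singleton]
      rw [← pvLoopA_fst]
      set v := (if p.2 == "G" then 1 else -1) with hv
      by_cases hb : (pvLoopA l).1 + v = 0
      · have h0 : (0 : Int) = (pvLoopA l).1 + v := by omega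
        by_cases hl : l.length = 0
        · simp [← h0, hl]
        · simp only [← h0]
          push_cast
          rw [if_pos (by omega : ((l.length : Int) + 1 - 1) ≠ 0)]
          omega
      · have h0 : (0 : Int) ≠ (pvLoopA l).1 + v := by omega
        rw [if_neg h0]
        have hsh : pvDownB (l.map (fun q => q.2)).reverse ((l.length : Int) + 1 - 1 - 1)
            (0 + v) ((pvLoopA l).1 + v)
            = pvDownB (l.map (fun q => q.2)).reverse ((l.length : Int) - 1) 0 (pvLoopA l).1 := by
          have := pvDownB_shift ((l.map (fun q => q.2)).reverse) ((l.length : Int) - 1) 0 (pvLoopA l).1 v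
          have hi : (l.length : Int) + 1 - 1 - 1 = (l.length : Int) - 1 := by ring
          rw [hi]; simpa using this
        push_cast
        rw [hsh, pvLoopA_fst]
        have hb' : ¬ (pvBal (l.map (fun q => q.2)) + v = 0) := by
          rw [← pvLoopA_fst]; exact hb
        simp only [if_neg hb']
        simpa using ih

-- ===== VERDICT =====
theorem solution_spec : Claim_equal_solution := by
  intro X Y colors _
  unfold Spec_solution solution solution_alt
  simp only [pvCsB, pvPtsA, pvCount_bal]
  exact pvCore (pvPtsA X Y colors)
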